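-- pv_equiv track=rewrite | github.com/liskos/leletko | ege05/309.py | f
-- ===== SOURCE A (Python) =====
-- def f(n):
--     s = ''
--     z = n
--     while z > 0:
--         s1 = bin(z % 10)[2:]
--         s = '0' * (4 - len(s1)) + s1 + str(s1.count('1') % 2) + s
--         z //= 10
--     s = '1' + s[2:] + '0'
--     return int(s, 2)
-- ===== SOURCE B (Python) =====
-- def f(n):
--     # Pure integer arithmetic: accumulate each digit's 5-bit group (4-bit value + parity)
--     # into an integer v, then apply A's "'1' + s[2:] + '0'" transform arithmetically.
--     if n <= 0:
--         return 2
--     v, m, z = 0, 1, n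
--     while z > 0:
--         d = z % 10
--         v += (2 * d + d.bit_count() % 2) * m
--         m *= 32
--         z //= 10
--     half = m // 4
--     return 2 * (half + v % half)
-- ===== Notes on version B (the rewrite author's own statement) =====
-- stated objective: alternative
-- what changed: Replaces A's binary-string building (padding, concatenation, slicing, int-base-two parsing) with a pure integer accumulator of a five-bit group per decimal digit and an arithmetic (power-of-two modulus) version of the final prepend-one/drop-prefix/append-zero transform.
import Mathlib
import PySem

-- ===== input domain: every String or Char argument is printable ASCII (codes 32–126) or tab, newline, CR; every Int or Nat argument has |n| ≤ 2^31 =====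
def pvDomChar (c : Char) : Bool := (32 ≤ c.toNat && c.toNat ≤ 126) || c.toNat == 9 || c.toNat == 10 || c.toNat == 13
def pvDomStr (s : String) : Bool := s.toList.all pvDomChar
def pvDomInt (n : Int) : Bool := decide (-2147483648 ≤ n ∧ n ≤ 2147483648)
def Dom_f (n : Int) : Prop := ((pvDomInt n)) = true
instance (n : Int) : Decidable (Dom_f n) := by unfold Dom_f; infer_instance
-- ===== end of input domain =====

-- B replaces A's binary-string building and int(s,2) parsing by a pure integer
-- accumulator of 5-bit digit groups plus an arithmetic final transform (objective: alternative).


-- termination helper for both loops (z //= 10 strictly decreases while z > 0)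
theorem pvFloordiv10_lt (z : Int) (h : 0 < z) : (PySem.Int.floordiv z 10).toNat < z.toNat := by
  have he : PySem.Int.floordiv z 10 = z / 10 :=
    PySem.Int.floordiv_eq_ediv_of_pos (by norm_num)
  omega

-- ===== PORT A =====
-- int(s, 2) ported by hand; exact here: every string A parses is a nonempty string of
-- '0'/'1' digit characters (no sign, whitespace, underscore or prefix).
def pvIntBase2 (cs : List Char) : Int :=
  cs.foldl (fun a c => 2 * a + (if c = '1' then 1 else 0)) 0

def fLoopA (z : Int) (s : List Char) : List Char :=
  if h : 0 < z then
    let s1 := PySem.List.slice (PySem.Int.toBinChars0b (PySem.Int.mod z 10)) (some 2) none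
    fLoopA (PySem.Int.floordiv z 10)
      (PySem.List.pyRepeat ['0'] (4 - (s1.length : Int)) ++ s1 ++
        PySem.Int.toChars (PySem.Int.mod ((PySem.Chars.count s1 ['1'] : Int)) 2) ++ s)
  else s
termination_by z.toNat
decreasing_by exact pvFloordiv10_lt z h

def f (n : Int) : Int :=
  let s := fLoopA n []
  pvIntBase2 (['1'] ++ PySem.List.slice s (some 2) none ++ ['0'])

-- ===== PORT B =====
def fLoopB (z v m : Int) : Int × Int :=
  if h : 0 < z then
    fLoopB (PySem.Int.floordiv z 10)
      (v + (2 * PySem.Int.mod z 10 +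
            PySem.Int.mod ((PySem.Int.bitCount (PySem.Int.mod z 10) : Int)) 2) * m)
      (m * 32)
  else (v, m)
termination_by z.toNat
decreasing_by exact pvFloordiv10_lt z h

def f_alt (n : Int) : Int :=
  if n ≤ 0 then 2
  else
    let vm := fLoopB n 0 1
    let half := PySem.Int.floordiv vm.2 4
    2 * (half + PySem.Int.mod vm.1 half)

-- ===== PRECONDITION & SPEC =====
def Spec_f (n : Int) (out : Int) : Prop := out = f_alt n
instance (n : Int) (out : Int) : Decidable (Spec_f n out) := by unfold Spec_f; infer_instance

-- ===== CLAIM (what is proved, stated in full; the proofs are below) =====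
def Claim_equal_f : Prop := ∀ (n : Int), Dom_f n → Spec_f n (f n)

-- ===== LEMMAS AND PROOFS =====

-- the 5-character block A's loop body prepends for digit d
def blockA (d : Int) : List Char :=
  PySem.List.pyRepeat ['0'] (4 - ((PySem.List.slice (PySem.Int.toBinChars0b d) (some 2) none).length : Int)) ++
    PySem.List.slice (PySem.Int.toBinChars0b d) (some 2) none ++
    PySem.Int.toChars (PySem.Int.mod ((PySem.Chars.count (PySem.List.slice (PySem.Int.toBinChars0b d) (some 2) none) ['1'] : Int)) 2)

-- B's 5-bit group value for digit d
def gB (d : Int) : Int := 2 * d + PySem.Int.mod ((PySem.Int.bitCount d : Int)) 2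

def blocksOf (z : Int) : List Char :=
  if h : 0 < z then blocksOf (PySem.Int.floordiv z 10) ++ blockA (PySem.Int.mod z 10) else []
termination_by z.toNat
decreasing_by exact pvFloordiv10_lt z h

theorem pvChars01 (l : List Char) (h : l.all (fun c => c == '0' || c == '1') = true) :
    ∀ c ∈ l, c = '0' ∨ c = '1' := by
  intro c hc
  have := List.all_eq_true.mp h c hc
  simpa using this

set_option maxRecDepth 4000 in
theorem blockA_facts (d : Int) (h0 : 0 ≤ d) (h10 : d < 10) :
    (blockA d).length = 5 ∧ (∀ c ∈ blockA d, c = '0' ∨ c = '1') ∧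
      pvIntBase2 (blockA d) = gB d := by
  interval_cases d <;> exact ⟨by decide, pvChars01 _ (by decide), by decide⟩

theorem fLoopA_eq_blocksOf (z : Int) : ∀ s, fLoopA z s = blocksOf z ++ s := by
  induction z using blocksOf.induct with
  | case1 z h ih =>
    intro s
    rw [fLoopA, blocksOf]
    simp only [dif_pos h, ih]
    simp only [blockA, List.append_assoc]
  | case2 z h =>
    intro s
    rw [fLoopA, blocksOf]
    simp only [dif_neg h]
    simp

theorem pvIntBase2_foldl (cs : List Char) : ∀ a : Int,
    cs.foldl (fun a c => 2 * a + (if c = '1' then 1 else 0)) a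
      = a * 2 ^ cs.length + pvIntBase2 cs := by
  induction cs with
  | nil => intro a; simp [pvIntBase2]
  | cons c cs ih =>
    intro a
    have h0 : pvIntBase2 (c :: cs)
        = (2 * 0 + (if c = '1' then (1 : Int) else 0)) * 2 ^ cs.length + pvIntBase2 cs := ih _
    rw [List.foldl_cons, ih, h0, List.length_cons, pow_succ]
    ring

theorem pvIntBase2_append (xs ys : List Char) :
    pvIntBase2 (xs ++ ys) = pvIntBase2 xs * 2 ^ ys.length + pvIntBase2 ys := by
  unfold pvIntBase2
  rw [List.foldl_append, pvIntBase2_foldl]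
  rfl

theorem pvIntBase2_bounds (cs : List Char) (h : ∀ c ∈ cs, c = '0' ∨ c = '1') :
    0 ≤ pvIntBase2 cs ∧ pvIntBase2 cs < 2 ^ cs.length := by
  induction cs with
  | nil => exact ⟨le_refl 0, by norm_num [pvIntBase2]⟩
  | cons c cs ih =>
    have hc : (if c = '1' then (1 : Int) else 0) = 0 ∨ (if c = '1' then (1 : Int) else 0) = 1 := by
      split <;> simp
    have hcs := ih (fun x hx => h x (List.mem_cons_of_mem _ hx))
    have hcons : pvIntBase2 (c :: cs) = (if c = '1' then (1 : Int) else 0) * 2 ^ cs.length + pvIntBase2 cs := by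
      have h0 : pvIntBase2 (c :: cs)
          = cs.foldl (fun a c => 2 * a + (if c = '1' then 1 else 0))
              (2 * 0 + (if c = '1' then (1 : Int) else 0)) := rfl
      rw [h0, pvIntBase2_foldl]
      ring
    have hpow : (0 : Int) < 2 ^ cs.length := by positivity
    constructor
    · rcases hc with h1 | h1 <;> rw [hcons, h1] <;> nlinarith [hcs.1]
    · rcases hc with h1 | h1 <;> rw [hcons, h1] <;> simp [List.length_cons, pow_succ] <;> nlinarith [hcs.2, hcs.1]

theorem blocksOf_facts (z : Int) :
    (∀ c ∈ blocksOf z, c = '0' ∨ c = '1') ∧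
      (∀ v m : Int, fLoopB z v m = (v + pvIntBase2 (blocksOf z) * m, m * 2 ^ (blocksOf z).length)) ∧
      (0 < z → 5 ≤ (blocksOf z).length) := by
  induction z using blocksOf.induct with
  | case1 z h ih =>
    have hd0 : 0 ≤ PySem.Int.mod z 10 := PySem.Int.mod_nonneg z (by norm_num)
    have hd10 : PySem.Int.mod z 10 < 10 := PySem.Int.mod_lt z (by norm_num)
    obtain ⟨hlen, hchars, hval⟩ := blockA_facts _ hd0 hd10
    have hblocks : blocksOf z = blocksOf (PySem.Int.floordiv z 10) ++ blockA (PySem.Int.mod z 10) := by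
      rw [blocksOf, dif_pos h]
    refine ⟨?_, ?_, ?_⟩
    · intro c hc
      rw [hblocks] at hc
      rcases List.mem_append.mp hc with hc | hc
      · exact ih.1 c hc
      · exact hchars c hc
    · intro v m
      rw [fLoopB, dif_pos h, ih.2.1, hblocks, pvIntBase2_append]
      simp only [List.length_append, hlen, hval, Prod.mk.injEq, gB]
      refine ⟨by ring, by rw [pow_add]; ring⟩
    · intro _
      rw [hblocks, List.length_append, hlen]
      omega
  | case2 z h =>
    refine ⟨by simp [blocksOf, h], ?_, fun hz => absurd hz h⟩
    intro v m
    rw [fLoopB, dif_neg h, blocksOf, dif_neg h]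
    simp [pvIntBase2]

-- ===== VERDICT (by name: the statement is the Claim_ definition above) =====
theorem f_spec : Claim_equal_f := by
  intro n _
  unfold Spec_f f f_alt
  by_cases hn : n ≤ 0
  · have hloop : fLoopA n [] = [] := by rw [fLoopA, dif_neg (by omega)]
    rw [if_pos hn]
    simp [hloop, pvIntBase2, PySem.List.slice]
  · have hpos : 0 < n := by omega
    obtain ⟨hchars, hB, hlen5⟩ := blocksOf_facts n
    have hlen5 := hlen5 hpos
    rw [if_neg hn]
    simp only [fLoopA_eq_blocksOf n [], List.append_nil, hB 0 1]
    set bs := blocksOf n with hbs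
    set L := bs.length with hL
    -- the two halves of bs
    have hsplit : bs = bs.take 2 ++ bs.drop 2 := (List.take_append_drop 2 bs).symm
    have hdl : (bs.drop 2).length = L - 2 := by simp [hL]
    have hdropBounds := pvIntBase2_bounds (bs.drop 2)
      (fun c hc => hchars c (List.mem_of_mem_drop hc))
    rw [hdl] at hdropBounds
    -- slice from 2 = drop 2
    have hslice : PySem.List.slice bs (some 2) none = bs.drop 2 := by
      rw [PySem.List.slice_from bs (by norm_num : (0 : Int) ≤ 2)]
      simp
    -- value of A's final string
    have hA : pvIntBase2 (['1'] ++ PySem.List.slice bs (some 2) none ++ ['0'])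
        = 2 * (2 ^ (L - 2) + pvIntBase2 (bs.drop 2)) := by
      rw [hslice, List.append_assoc, pvIntBase2_append, pvIntBase2_append]
      simp [pvIntBase2, List.length_append, hdl]
      ring
    rw [hA]
    -- B's half = 2 ^ (L - 2)
    have hm : (1 : Int) * 2 ^ L = 2 ^ (L - 2) * 4 := by
      have h2 : (2 : Int) ^ L = 2 ^ (L - 2) * 2 ^ 2 := by
        rw [← pow_add]
        congr 1
        omega
      rw [one_mul, h2]
      norm_num
    have hhalf : PySem.Int.floordiv ((1 : Int) * 2 ^ L) 4 = 2 ^ (L - 2) := by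
      rw [PySem.Int.floordiv_eq_ediv_of_pos (by norm_num), hm,
        Int.mul_ediv_cancel _ (by norm_num)]
    -- B's v mod half = value of bs.drop 2
    have hv : pvIntBase2 bs * 1 = pvIntBase2 (bs.take 2) * 2 ^ (L - 2) + pvIntBase2 (bs.drop 2) := by
      rw [mul_one]
      conv_lhs => rw [hsplit]
      rw [pvIntBase2_append, hdl]
    have hmod : PySem.Int.mod (0 + pvIntBase2 bs * 1) (2 ^ (L - 2)) = pvIntBase2 (bs.drop 2) := by
      rw [PySem.Int.mod_eq_emod_of_pos (by positivity), zero_add, hv, add_comm,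
        Int.add_mul_emod_self_right _ _ _]
      exact Int.emod_eq_of_lt hdropBounds.1 hdropBounds.2
    simp only [hhalf, hmod]
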